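-- pv_equiv track=rewrite | github.com/DanielSlater/ModelLearning | pcams/common.py | combinations_between_bool_vectors
-- ===== SOURCE A (Python) =====
-- def combinations_between_bool_vectors(min_vector, max_vector):
--     """
--     Examples:
--         >> list(combinations_between_bool_vectors([False, False], [False, True]))
--         [(False, False), (False, True)]
--
--     Args:
--         min_vector (Iterable of bool):
--         max_vector (Iterable of bool):
--
--     Returns:
--         Generator of Tuple of bool
--     """
--     if len(min_vector) <= 1:
--         if min_vector[0]:
--             yield (True,)
--         elif max_vector[0]:
--             yield (True,)
--             yield (False,)
--         else:
--             yield (False,)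
--     else:
--         for perm in combinations_between_bool_vectors(min_vector[1:], max_vector[1:]):
--             if min_vector[0]:
--                 yield (True,) + perm
--             elif max_vector[0]:
--                 yield (True,) + perm
--                 yield (False,) + perm
--             else:
--                 yield (False,) + perm
-- ===== SOURCE B (Python) =====
-- def combinations_between_bool_vectors(min_vector, max_vector):
--     # Count the free positions (min falsy, max truthy), then decode each
--     # counter k in range(2**free) into one output tuple via its bits:
--     # bit j = 0 means True at the j-th free position (so True comes first
--     # and earlier positions vary fastest, matching the recursive order).
--     free = 0
--     for i in range(len(min_vector)):
--         if not min_vector[i] and max_vector[i]: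
--             free += 1
--     for k in range(2 ** free):
--         bits = k
--         out = []
--         for i in range(len(min_vector)):
--             if min_vector[i]:
--                 out.append(True)
--             elif max_vector[i]:
--                 out.append(bits & 1 == 0)
--                 bits >>= 1
--             else:
--                 out.append(False)
--         yield tuple(out)
-- ===== Notes on version B (the rewrite author's own statement) =====
-- stated objective: alternative
-- what changed: B counts the free positions (min falsy, max truthy) once and decodes each counter k in range(2**free) into an output tuple from k's bits, instead of A's recursive suffix-expanding generator.
import Mathlib
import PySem

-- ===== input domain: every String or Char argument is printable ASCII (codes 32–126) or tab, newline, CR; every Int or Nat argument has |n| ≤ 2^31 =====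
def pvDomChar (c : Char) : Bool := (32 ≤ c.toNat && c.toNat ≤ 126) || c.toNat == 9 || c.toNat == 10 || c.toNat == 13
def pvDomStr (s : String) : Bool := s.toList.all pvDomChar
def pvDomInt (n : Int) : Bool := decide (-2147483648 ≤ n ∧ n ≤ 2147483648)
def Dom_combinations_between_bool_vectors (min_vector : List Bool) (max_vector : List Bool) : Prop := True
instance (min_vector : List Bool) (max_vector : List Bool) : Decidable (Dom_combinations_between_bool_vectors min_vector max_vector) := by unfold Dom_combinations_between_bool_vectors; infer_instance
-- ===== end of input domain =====

-- B replaces A's recursive suffix-expanding generator by counting the free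
-- positions and decoding each counter k < 2^free into one output vector from
-- k's bits (alternative decomposition; same ordering, same values).


-- ===== PORT A =====
-- Literal port of A's recursive generator. Where Python raises IndexError
-- (empty min_vector, or max_vector[0] on an empty remaining max_vector) the
-- port returns a default ([] / the false branch); those inputs are excluded
-- by Pre_.
def combinations_between_bool_vectors (min_vector : List Bool) (max_vector : List Bool) : List (List Bool) :=
  match min_vector with
  | [] => []          -- min_vector[0] raises IndexError; outside Pre_
  | [m] =>
    if m then [[true]]
    else if max_vector.getD 0 false then [[true], [false]]
    else [[false]]
  | m :: m2 :: rest =>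
    (combinations_between_bool_vectors (m2 :: rest) (max_vector.drop 1)).flatMap
      (fun perm =>
        if m then [true :: perm]
        else if max_vector.getD 0 false then [true :: perm, false :: perm]
        else [false :: perm])

-- ===== PORT B =====
-- B's index loops `for i in range(len(min_vector))` reading min_vector[i] /
-- max_vector[i] are transcribed as structural recursion consuming both lists
-- in step (max_vector[i] = head of the remaining max; getD covers the raising
-- short-max case, which Pre_ excludes).  bits & 1 == 0 is bits % 2 = 0 and
-- bits >>= 1 is bits / 2 (bits is a nonnegative counter).
def pvFreeCount (min_vector : List Bool) (max_vector : List Bool) : Nat :=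
  match min_vector with
  | [] => 0
  | m :: rest =>
    (if !m && max_vector.getD 0 false then 1 else 0) + pvFreeCount rest (max_vector.drop 1)

def pvDecode (min_vector : List Bool) (max_vector : List Bool) (bits : Nat) : List Bool :=
  match min_vector with
  | [] => []
  | m :: rest =>
    if m then true :: pvDecode rest (max_vector.drop 1) bits
    else if max_vector.getD 0 false then
      decide (bits % 2 = 0) :: pvDecode rest (max_vector.drop 1) (bits / 2)
    else false :: pvDecode rest (max_vector.drop 1) bits

def combinations_between_bool_vectors_alt (min_vector : List Bool) (max_vector : List Bool) : List (List Bool) :=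
  (List.range (2 ^ pvFreeCount min_vector max_vector)).map
    (fun k => pvDecode min_vector max_vector k)

-- ===== PRECONDITION & SPEC =====
-- Pre_ excludes exactly the inputs where Python A raises IndexError:
-- an empty min_vector, and positions where min_vector[i] is False but
-- max_vector has no element i.
def Pre_combinations_between_bool_vectors (min_vector : List Bool) (max_vector : List Bool) : Prop :=
  min_vector ≠ [] ∧ ∀ i < min_vector.length, min_vector.getD i false = true ∨ i < max_vector.length
instance (min_vector : List Bool) (max_vector : List Bool) : Decidable (Pre_combinations_between_bool_vectors min_vector max_vector) := by unfold Pre_combinations_between_bool_vectors; infer_instance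
def pvWitness_combinations_between_bool_vectors : List Bool × List Bool := ([false, true, false], [true, true, false])

def Spec_combinations_between_bool_vectors (min_vector : List Bool) (max_vector : List Bool) (out : List (List Bool)) : Prop := out = combinations_between_bool_vectors_alt min_vector max_vector
instance (min_vector : List Bool) (max_vector : List Bool) (out : List (List Bool)) : Decidable (Spec_combinations_between_bool_vectors min_vector max_vector out) := by unfold Spec_combinations_between_bool_vectors; infer_instance

-- ===== CLAIM (what is proved, stated in full; the proofs are below) =====
def Claim_equal_combinations_between_bool_vectors : Prop := ∀ (min_vector : List Bool) (max_vector : List Bool), Dom_combinations_between_bool_vectors min_vector max_vector → Pre_combinations_between_bool_vectors min_vector max_vector → Spec_combinations_between_bool_vectors min_vector max_vector (combinations_between_bool_vectors min_vector max_vector)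

-- ===== LEMMAS AND PROOFS =====

theorem pvFlatMap_single {α β : Type} (f : α → β) (l : List α) :
    l.flatMap (fun x => [f x]) = l.map f := by
  induction l with
  | nil => rfl
  | cons a t ih => simp [List.flatMap_cons, ih]

theorem pvRange_double_flatMap {α : Type} (g : Nat → α) :
    ∀ n : Nat, (List.range (2 * n)).map g
      = (List.range n).flatMap (fun k => [g (2 * k), g (2 * k + 1)]) := by
  intro n
  induction n with
  | zero => simp
  | succ n ih =>
    have h2 : 2 * (n + 1) = (2 * n + 1) + 1 := by omega
    rw [h2, List.range_succ, List.range_succ, List.range_succ]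
    simp [ih, List.flatMap_append]

-- step lemma for a fixed position (head choice c is forced)
theorem pvStep_fixed (w : Nat → List Bool) (c : Bool) (N : Nat) :
    ((List.range N).map w).flatMap (fun perm => [c :: perm])
      = (List.range N).map (fun k => c :: w k) := by
  rw [List.flatMap_map]
  exact pvFlatMap_single _ _

-- step lemma for a free position: A interleaves True/False per suffix,
-- B doubles the counter range and reads the new low bit
theorem pvStep_free (w : Nat → List Bool) (N : Nat) :
    ((List.range N).map w).flatMap (fun perm => [true :: perm, false :: perm])
      = (List.range (2 * N)).map (fun k => decide (k % 2 = 0) :: w (k / 2)) := by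
  rw [pvRange_double_flatMap, List.flatMap_map]
  refine List.flatMap_congr ?_
  intro k _
  have h1 : 2 * k % 2 = 0 := by omega
  have h2 : 2 * k / 2 = k := by omega
  have h3 : (2 * k + 1) % 2 = 1 := by omega
  have h4 : (2 * k + 1) / 2 = k := by omega
  simp [h1, h2, h3, h4]

theorem pv_equal_aux :
    ∀ (min_vector max_vector : List Bool), min_vector ≠ [] →
      combinations_between_bool_vectors min_vector max_vector
        = combinations_between_bool_vectors_alt min_vector max_vector := by
  intro mn
  induction mn with
  | nil => intro mx h; exact absurd rfl h
  | cons m rest ih =>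
    intro mx _
    cases rest with
    | nil =>
      -- singleton base case: after casing on m and on the head of mx every
      -- branch is a closed computation
      cases m <;> rcases mx with _ | ⟨b, t⟩ <;> [skip; cases b; skip; cases b] <;> rfl
    | cons m2 r2 =>
      have ihr := ih (mx.drop 1) (by simp)
      rw [show combinations_between_bool_vectors (m :: m2 :: r2) mx
          = (combinations_between_bool_vectors (m2 :: r2) (mx.drop 1)).flatMap
              (fun perm =>
                if m then [true :: perm]
                else if mx.getD 0 false then [true :: perm, false :: perm]
                else [false :: perm]) from rfl,
        ihr]
      show _ = (List.range (2 ^ pvFreeCount (m :: m2 :: r2) mx)).map (pvDecode (m :: m2 :: r2) mx)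
      cases m with
      | true =>
        rw [show pvFreeCount (true :: m2 :: r2) mx
            = pvFreeCount (m2 :: r2) (mx.drop 1) from by
          rw [show pvFreeCount (true :: m2 :: r2) mx
              = (if !true && mx.getD 0 false then 1 else 0)
                + pvFreeCount (m2 :: r2) (mx.drop 1) from rfl]
          simp]
        rw [show (fun (perm : List Bool) => if true then [true :: perm]
              else if mx.getD 0 false then [true :: perm, false :: perm]
              else [false :: perm]) = fun perm => [true :: perm] from rfl]
        unfold combinations_between_bool_vectors_alt
        rw [pvStep_fixed]
        exact List.map_congr_left (fun k _ =>
          (show pvDecode (true :: m2 :: r2) mx k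
            = true :: pvDecode (m2 :: r2) (mx.drop 1) k from rfl).symm)
      | false =>
        rcases hmx : mx with _ | ⟨b, t⟩
        · -- max_vector empty: getD gives false (the raising case is outside Pre_)
          unfold combinations_between_bool_vectors_alt
          rw [show (fun (perm : List Bool) => if false then [true :: perm]
                else if List.getD ([] : List Bool) 0 false then [true :: perm, false :: perm]
                else [false :: perm]) = fun perm => [false :: perm] from rfl,
            pvStep_fixed,
            show pvFreeCount (false :: m2 :: r2) []
              = 0 + pvFreeCount (m2 :: r2) [] from rfl, Nat.zero_add]
          exact List.map_congr_left (fun k _ =>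
            (show pvDecode (false :: m2 :: r2) [] k
              = false :: pvDecode (m2 :: r2) [] k from rfl).symm)
        · cases b with
          | true =>
            unfold combinations_between_bool_vectors_alt
            rw [show (fun (perm : List Bool) => if false then [true :: perm]
                  else if List.getD (true :: t) 0 false then [true :: perm, false :: perm]
                  else [false :: perm]) = fun perm => [true :: perm, false :: perm] from rfl,
              pvStep_free,
              show pvFreeCount (false :: m2 :: r2) (true :: t)
                = 1 + pvFreeCount (m2 :: r2) t from rfl,
              show (2 : Nat) ^ (1 + pvFreeCount (m2 :: r2) t)
                = 2 * 2 ^ pvFreeCount (m2 :: r2) t from by rw [pow_add]; ring]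
            exact List.map_congr_left (fun k _ =>
              (show pvDecode (false :: m2 :: r2) (true :: t) k
                = decide (k % 2 = 0) :: pvDecode (m2 :: r2) t (k / 2) from rfl).symm)
          | false =>
            unfold combinations_between_bool_vectors_alt
            rw [show (fun (perm : List Bool) => if false then [true :: perm]
                  else if List.getD (false :: t) 0 false then [true :: perm, false :: perm]
                  else [false :: perm]) = fun perm => [false :: perm] from rfl,
              pvStep_fixed,
              show pvFreeCount (false :: m2 :: r2) (false :: t)
                = 0 + pvFreeCount (m2 :: r2) t from rfl, Nat.zero_add]
            exact List.map_congr_left (fun k _ =>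
              (show pvDecode (false :: m2 :: r2) (false :: t) k
                = false :: pvDecode (m2 :: r2) t k from rfl).symm)

-- ===== VERDICT (by name: the statement is the Claim_ definition above) =====
theorem combinations_between_bool_vectors_spec : Claim_equal_combinations_between_bool_vectors := by
  intro mn mx _ hpre
  unfold Spec_combinations_between_bool_vectors
  exact pv_equal_aux mn mx hpre.1
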